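-- pv_equiv track=rewrite | github.com/mega-mac-slice/learn-python | src/2018_10_01_1538419057/main.py | sum_exists
-- ===== SOURCE A (Python) =====
-- from typing import List
--
-- def sum_exists(a: List[int], b: List[int]) -> bool:
--     seen = set()
--
--     for x in a:
--         for y in b:
--             diff = y - x
--
--             if diff in seen:
--                 return True
--
--         seen.add(x)
--
--     return False
-- ===== SOURCE B (Python) =====
-- from typing import List
--
-- def sum_exists(a: List[int], b: List[int]) -> bool:
--     sums = {a[i] + a[j] for i in range(len(a)) for j in range(i + 1, len(a))}
--     return not set(b).isdisjoint(sums)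
-- ===== Notes on version B (the rewrite author's own statement) =====
-- stated objective: alternative
-- what changed: Replaces A's short-circuiting incremental seen-set double loop over a and b with a two-phase build-then-intersect structure: first materialise the set of all pairwise sums of distinct index pairs of a, then test disjointness against set(b).
import Mathlib
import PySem

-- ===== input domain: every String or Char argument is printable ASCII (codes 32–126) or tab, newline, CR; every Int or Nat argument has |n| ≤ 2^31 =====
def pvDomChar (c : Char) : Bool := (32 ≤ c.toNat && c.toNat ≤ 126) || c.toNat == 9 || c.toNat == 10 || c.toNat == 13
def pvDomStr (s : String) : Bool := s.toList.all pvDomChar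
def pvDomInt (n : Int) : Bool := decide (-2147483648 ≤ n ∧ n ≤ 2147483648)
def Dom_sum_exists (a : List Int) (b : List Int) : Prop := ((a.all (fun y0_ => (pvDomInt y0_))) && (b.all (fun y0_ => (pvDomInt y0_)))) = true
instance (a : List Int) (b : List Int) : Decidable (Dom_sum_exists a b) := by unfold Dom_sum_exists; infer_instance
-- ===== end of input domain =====

-- B replaces A's short-circuiting seen-set double loop with a two-phase build-then-intersect
-- decomposition: materialise all pairwise sums of distinct index pairs of a, then test disjointness against set(b).


-- ===== PORT A =====
-- for x in a: for y in b: if y - x in seen: return True; then seen.add(x); finally return False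
def sumExistsLoopA (b : List Int) : List Int → PySem.Set Int → Bool
  | [], _ => false
  | x :: rest, seen =>
    if b.any (fun y => PySem.Set.contains seen (y - x)) then true
    else sumExistsLoopA b rest (PySem.Set.add seen x)

def sum_exists (a : List Int) (b : List Int) : Bool :=
  sumExistsLoopA b a PySem.Set.empty

-- ===== PORT B =====
-- sums = {a[i]+a[j] for i in range(len(a)) for j in range(i+1, len(a))}; return not set(b).isdisjoint(sums)
def sum_exists_alt (a : List Int) (b : List Int) : Bool :=
  let sums : PySem.Set Int := PySem.Set.ofList
    ((PySem.List.pyRange 0 (a.length : Int) 1).flatMap (fun i =>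
      (PySem.List.pyRange (i + 1) (a.length : Int) 1).map (fun j =>
        PySem.List.pyGetD a i 0 + PySem.List.pyGetD a j 0)))
  !(PySem.Set.isdisjoint (PySem.Set.ofList b) sums)

-- ===== PRECONDITION & SPEC =====
def Spec_sum_exists (a : List Int) (b : List Int) (out : Bool) : Prop := out = sum_exists_alt a b
instance (a : List Int) (b : List Int) (out : Bool) : Decidable (Spec_sum_exists a b out) := by unfold Spec_sum_exists; infer_instance

-- ===== CLAIM (what is proved, stated in full; the proofs are below) =====
def Claim_equal_sum_exists : Prop := ∀ (a : List Int) (b : List Int), Dom_sum_exists a b → Spec_sum_exists a b (sum_exists a b)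

-- ===== LEMMAS AND PROOFS =====

-- the common meaning: some pair of distinct positions of a sums to an element of b
def SumKey (a b : List Int) : Prop :=
  ∃ j, ∃ _ : j < a.length, ∃ i, ∃ hij : i < j, ∃ y ∈ b, y - a[j] = a[i]'(by omega)

theorem loopA_true_iff (b : List Int) (l : List Int) (seen : PySem.Set Int) :
    sumExistsLoopA b l seen = true ↔
      ∃ j, ∃ h : j < l.length, ∃ y ∈ b, (y - l[j]) ∈ seen ∨ (y - l[j]) ∈ l.take j := by
  induction l generalizing seen with
  | nil => simp [sumExistsLoopA]
  | cons x rest ih =>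
    rw [sumExistsLoopA]
    by_cases hhit : b.any (fun y => PySem.Set.contains seen (y - x)) = true
    · rw [if_pos hhit]
      simp only [true_iff]
      rw [List.any_eq_true] at hhit
      obtain ⟨y, hy, hc⟩ := hhit
      exact ⟨0, by simp, y, hy, Or.inl (List.mem_of_elem_eq_true hc)⟩
    · rw [if_neg hhit, ih]
      constructor
      · rintro ⟨j, hj, y, hy, hmem⟩
        refine ⟨j + 1, by simpa using Nat.succ_lt_succ hj, y, hy, ?_⟩
        simpa [PySem.Set.mem_add, List.take_succ_cons, or_assoc, or_comm (a := y - rest[j] = x)] using hmem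
      · rintro ⟨j, hj, y, hy, hmem⟩
        match j, hj with
        | 0, _ =>
          exfalso
          simp only [List.getElem_cons_zero, List.take_zero, List.not_mem_nil, or_false] at hmem
          exact hhit (List.any_eq_true.mpr ⟨y, hy, List.elem_eq_true_of_mem hmem⟩)
        | j' + 1, hj =>
          have hlt : j' < rest.length := by simpa using Nat.lt_of_succ_lt_succ hj
          refine ⟨j', hlt, y, hy, ?_⟩
          simpa [PySem.Set.mem_add, List.take_succ_cons, or_assoc, or_comm (a := y - rest[j']'hlt = x)] using hmem

theorem A_true_iff (a b : List Int) : sum_exists a b = true ↔ SumKey a b := by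
  rw [sum_exists, loopA_true_iff]
  unfold SumKey
  constructor
  · rintro ⟨j, hj, y, hy, hmem⟩
    rcases hmem with h | h
    · simp [PySem.Set.empty] at h
    · rw [List.mem_take_iff_getElem] at h
      obtain ⟨i, hi, hgi⟩ := h
      exact ⟨j, hj, i, by omega, y, hy, by rw [← hgi]⟩
  · rintro ⟨j, hj, i, hij, y, hy, hsum⟩
    refine ⟨j, hj, y, hy, Or.inr ?_⟩
    rw [List.mem_take_iff_getElem]
    exact ⟨i, by omega, hsum.symm⟩

theorem B_true_iff (a b : List Int) : sum_exists_alt a b = true ↔ SumKey a b := by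
  unfold sum_exists_alt SumKey
  simp [PySem.Set.isdisjoint, PySem.Set.mem_ofList, List.mem_flatMap, List.mem_map,
    PySem.List.mem_pyRange_one]
  constructor
  · rintro ⟨i, j, hmem, ⟨hi0, hin⟩, hij, hjn⟩
    rw [PySem.List.pyGetD_eq_getElem a 0 hi0 hin, PySem.List.pyGetD_eq_getElem a 0 (by omega) hjn] at hmem
    exact ⟨j.toNat, by omega, i.toNat, by omega, _, hmem, by ring⟩
  · rintro ⟨j, hj, i, hij, y, hy, hsum⟩
    refine ⟨(i : Int), (j : Int), ?_, ⟨by omega, by omega⟩, by omega, by omega⟩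
    rw [PySem.List.pyGetD_eq_getElem a 0 (by omega) (by exact_mod_cast by omega : (i:Int) < (a.length:Int)),
        PySem.List.pyGetD_eq_getElem a 0 (by omega) (by exact_mod_cast by omega : (j:Int) < (a.length:Int))]
    simp only [Int.toNat_natCast]
    have h : a[i]'(by omega) + a[j]'hj = y := by omega
    rw [h]; exact hy

-- ===== VERDICT (by name: the statement is the Claim_ definition above) =====
theorem sum_exists_spec : Claim_equal_sum_exists := by
  intro a b _
  unfold Spec_sum_exists
  by_cases h : SumKey a b
  · rw [(A_true_iff a b).mpr h, ((B_true_iff a b).mpr h).symm]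
  · have ha := (A_true_iff a b).not.mpr h
    have hb := (B_true_iff a b).not.mpr h
    simp only [Bool.not_eq_true] at ha hb
    rw [ha, hb]
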